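-- pv_equiv track=rewrite | github.com/ludelah/pintarTablero | pintarTablero.py | colorear_tablero
-- ===== SOURCE A (Python) =====
-- def colorear_tablero(n):
--     tablero = []
--     for i in range(n):
--         fila = []
--         for j in range(n):
--             if j < i or j == i:  # Agregar condición para que la primera fila contenga "rojo"
--                 fila.append('rojo')
--             else:
--                 fila.append('azul')
--         tablero.append(fila)
--     return tablero
-- ===== SOURCE B (Python) =====
-- def colorear_tablero(n):
--     tablero = []
--     fila = ['azul'] * n
--     for i in range(n):
--         fila = fila[:]
--         fila[i] = 'rojo'
--         tablero.append(fila)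
--     return tablero
-- ===== Notes on version B (the rewrite author's own statement) =====
-- stated objective: alternative
-- what changed: B builds the board incrementally: it keeps one running row (initially all 'azul') and derives each next row from the previous one by copying it and flipping the single cell i to 'rojo', instead of deciding every cell with a per-cell j<=i test.
import Mathlib
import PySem

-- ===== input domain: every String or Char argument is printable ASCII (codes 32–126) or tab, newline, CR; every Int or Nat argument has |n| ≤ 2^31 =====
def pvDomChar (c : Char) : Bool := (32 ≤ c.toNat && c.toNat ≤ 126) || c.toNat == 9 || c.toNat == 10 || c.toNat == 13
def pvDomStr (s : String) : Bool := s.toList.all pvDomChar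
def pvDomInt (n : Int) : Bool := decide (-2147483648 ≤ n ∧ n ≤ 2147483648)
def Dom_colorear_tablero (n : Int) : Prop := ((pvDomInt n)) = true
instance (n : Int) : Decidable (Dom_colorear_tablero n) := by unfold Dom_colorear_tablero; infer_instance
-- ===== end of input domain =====

-- B builds the board incrementally: one running row, each next row is a copy of the previous with cell i flipped to "rojo" (objective: alternative decomposition, same cost).

-- ===== PORT A =====
def colorear_tablero (n : Int) : List (List String) :=
  (PySem.List.pyRange 0 n 1).foldl (fun tablero i =>
    tablero ++ [(PySem.List.pyRange 0 n 1).foldl (fun fila j =>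
      if j < i ∨ j = i then fila ++ ["rojo"] else fila ++ ["azul"]) []]) []

-- ===== PORT B =====
-- fila[:] → slice none none; fila[i] = 'rojo' → pySetD (i is always 0 ≤ i < len(fila) inside the loop, where pySetD is exact)
def colorear_tablero_alt (n : Int) : List (List String) :=
  ((PySem.List.pyRange 0 n 1).foldl (fun st i =>
      let fila := PySem.List.pySetD (PySem.List.slice st.2 none none) i "rojo"
      (st.1 ++ [fila], fila))
    (([] : List (List String)), List.replicate n.toNat "azul")).1

-- ===== PRECONDITION & SPEC =====
def Spec_colorear_tablero (n : Int) (out : List (List String)) : Prop := out = colorear_tablero_alt n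
instance (n : Int) (out : List (List String)) : Decidable (Spec_colorear_tablero n out) := by unfold Spec_colorear_tablero; infer_instance

-- ===== CLAIM (what is proved, stated in full; the proofs are below) =====
def Claim_equal_colorear_tablero : Prop := ∀ (n : Int), Dom_colorear_tablero n → Spec_colorear_tablero n (colorear_tablero n)

-- ===== LEMMAS AND PROOFS =====

-- the canonical row k of an N×N board
def pvRowOf (N k : Nat) : List String :=
  List.replicate (k + 1) "rojo" ++ List.replicate (N - k - 1) "azul"

-- a prefix of r "rojo" then "azul": the row of A's inner loop over Nat indices
theorem pvRow_eq (r m : Nat) (hr : r ≤ m) :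
    (List.range m).map (fun k => if k < r then "rojo" else "azul")
      = List.replicate r "rojo" ++ List.replicate (m - r) "azul" := by
  induction m generalizing r with
  | zero => interval_cases r; simp
  | succ t ih =>
    cases r with
    | zero => simp
    | succ s =>
      rw [List.range_succ_eq_map, List.map_cons, List.map_map]
      have hs : s ≤ t := Nat.lt_succ_iff.mp hr
      have : ((fun k => if k < s + 1 then "rojo" else "azul") ∘ Nat.succ)
          = (fun k => if k < s then "rojo" else "azul") := by
        funext k; simp [Function.comp]
      rw [this, ih s hs]
      simp [List.replicate_succ, Nat.succ_sub_succ]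

theorem colorear_tablero_row (n i : Int) (h0 : 0 ≤ i) (hn : i < n) :
    (PySem.List.pyRange 0 n 1).foldl (fun fila j =>
        if j < i ∨ j = i then fila ++ ["rojo"] else fila ++ ["azul"]) []
      = pvRowOf n.toNat i.toNat := by
  have hc : ∀ (fila : List String) (j : Int),
      (if j < i ∨ j = i then fila ++ ["rojo"] else fila ++ ["azul"])
        = fila ++ [if j < i ∨ j = i then "rojo" else "azul"] := by
    intro fila j; split <;> rfl
  have h1 : (PySem.List.pyRange 0 n 1).foldl (fun fila j =>
        if j < i ∨ j = i then fila ++ ["rojo"] else fila ++ ["azul"]) []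
      = (PySem.List.pyRange 0 n 1).foldl (fun fila j =>
        fila ++ [if j < i ∨ j = i then "rojo" else "azul"]) [] :=
    PySem.List.foldl_congr_mem _ _ _ _ (fun fila j _ => hc fila j)
  rw [h1, PySem.List.foldl_append_singleton_eq_map]
  rw [PySem.List.pyRange_one, List.map_map]
  have hfun : ((fun j => if j < i ∨ j = i then "rojo" else "azul") ∘ (fun k : Nat => (0 : Int) + k))
      = (fun k : Nat => if k < i.toNat + 1 then "rojo" else "azul") := by
    funext k
    have : ((0 : Int) + k < i ∨ (0 : Int) + k = i) ↔ k < i.toNat + 1 := by omega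
    simp only [Function.comp]
    rw [if_congr this rfl rfl]
  rw [hfun]
  have hsub : (n - 0).toNat - (i.toNat + 1) = n.toNat - i.toNat - 1 := by omega
  rw [pvRow_eq (i.toNat + 1) ((n - 0).toNat) (by omega), hsub]
  rfl

-- A equals the canonical board
theorem colorear_tablero_eq_canon (n : Int) :
    colorear_tablero n = (List.range n.toNat).map (pvRowOf n.toNat) := by
  unfold colorear_tablero
  rw [PySem.List.foldl_append_singleton_eq_map, List.nil_append]
  rw [PySem.List.pyRange_one, List.map_map]
  have h0 : n - 0 = n := by ring
  rw [h0]
  apply List.map_congr_left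
  intro k hk
  have hk' : (k : Int) < n := by
    have := List.mem_range.mp hk; omega
  have h := colorear_tablero_row n ((0 : Int) + k) (by omega) (by omega)
  rw [PySem.List.pyRange_one, h0] at h
  rw [Function.comp, h]
  congr 1
  omega

-- flipping cell m of the canonical "m reds so far" row gives the canonical row m
theorem pvFlip_eq (N m : Nat) (h : m < N) :
    (List.replicate m "rojo" ++ List.replicate (N - m) "azul").set m "rojo"
      = pvRowOf N m := by
  have hlen : (List.replicate m "rojo").length = m := List.length_replicate
  have hNm : N - m = (N - m - 1) + 1 := by omega
  rw [hNm, List.replicate_succ]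
  rw [List.set_append_right _ _ (by omega)]
  simp [pvRowOf, List.replicate_succ' (n := m), hlen]

-- B's loop invariant over List.range
theorem altB_invariant (N : Nat) : ∀ (m : Nat), m ≤ N →
    (List.range m).foldl (fun (st : List (List String) × List String) (k : Nat) =>
        let fila := st.2.set k "rojo"
        (st.1 ++ [fila], fila))
      (([] : List (List String)), List.replicate N "azul")
    = ((List.range m).map (pvRowOf N),
       List.replicate m "rojo" ++ List.replicate (N - m) "azul") := by
  intro m hm
  induction m with
  | zero => simp
  | succ t ih =>
    rw [List.range_succ, List.foldl_append, ih (by omega), List.map_append]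
    simp only [List.foldl_cons, List.foldl_nil, List.map_cons, List.map_nil]
    rw [pvFlip_eq N t (by omega)]
    have h2 : pvRowOf N t = List.replicate (t + 1) "rojo" ++ List.replicate (N - (t + 1)) "azul" := by
      unfold pvRowOf
      have : N - t - 1 = N - (t + 1) := by omega
      rw [this]
    exact congrArg (fun r => ((List.range t).map (pvRowOf N) ++ [pvRowOf N t], r)) h2

-- B equals the canonical board
theorem colorear_tablero_alt_eq_canon (n : Int) :
    colorear_tablero_alt n = (List.range n.toNat).map (pvRowOf n.toNat) := by
  unfold colorear_tablero_alt
  rw [PySem.List.pyRange_one, List.foldl_map]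
  have hsub : (n - 0).toNat = n.toNat := by omega
  rw [hsub]
  have h1 : (List.range n.toNat).foldl
      (fun (st : List (List String) × List String) (k : Nat) =>
        let fila := PySem.List.pySetD (PySem.List.slice st.2 none none) ((0 : Int) + k) "rojo"
        (st.1 ++ [fila], fila))
      (([] : List (List String)), List.replicate n.toNat "azul")
    = (List.range n.toNat).foldl
      (fun (st : List (List String) × List String) (k : Nat) =>
        let fila := st.2.set k "rojo"
        (st.1 ++ [fila], fila))
      (([] : List (List String)), List.replicate n.toNat "azul") :=
    PySem.List.foldl_congr_mem _ _ _ _ (fun st k _ => by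
      simp [PySem.List.slice_none_none])
  rw [h1, altB_invariant n.toNat n.toNat le_rfl]

-- ===== VERDICT (by name: the statement is the Claim_ definition above) =====
theorem colorear_tablero_spec : Claim_equal_colorear_tablero := by
  intro n _
  unfold Spec_colorear_tablero
  rw [colorear_tablero_eq_canon, colorear_tablero_alt_eq_canon]
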